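-- pv_equiv track=rewrite | github.com/walshkang/gradeline | grader/report.py | resolve_identifier_column
-- ===== SOURCE A (Python) =====
-- def resolve_column_name(fieldnames: list[str], requested: str, kind: str) -> str:
--     if requested in fieldnames:
--         return requested
--
--     lowered = requested.lower()
--     casefold_matches = [name for name in fieldnames if name.lower() == lowered]
--     if len(casefold_matches) == 1:
--         return casefold_matches[0]
--     if len(casefold_matches) > 1:
--         raise ValueError(
--             f"Requested {kind} column '{requested}' matches multiple columns by case-insensitive name: "
--             f"{casefold_matches}. Use the exact header name."
--         )
--
--     prefix_matches = [
--         name for name in fieldnames if name.lower().startswith(lowered)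
--     ]
--     if len(prefix_matches) == 1:
--         return prefix_matches[0]
--     if len(prefix_matches) > 1:
--         raise ValueError(
--             f"Requested {kind} column '{requested}' matched multiple prefix columns: {prefix_matches}. "
--             "Use the exact header name."
--         )
--
--     raise ValueError(
--         f"Requested {kind} column '{requested}' was not found in CSV headers: {fieldnames}"
--     )
--
-- def resolve_identifier_column(fieldnames: list[str], requested: str) -> tuple[str, str | None]:
--     try:
--         return resolve_column_name(fieldnames, requested, kind="identifier"), None
--     except ValueError:
--         pass
--
--     preferred_names = (
--         "OrgDefinedId",
--         "Org Defined ID",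
--         "Username",
--         "User Name",
--         "UserName",
--     )
--
--     for preferred in preferred_names:
--         for field in fieldnames:
--             if field.lower() == preferred.lower():
--                 return (
--                     field,
--                     f"Identifier column '{requested}' not found; using '{field}' instead.",
--                 )
--
--     for field in fieldnames:
--         normalized = field.lower().replace(" ", "")
--         if "orgdefinedid" in normalized or "username" in normalized:
--             return (
--                 field,
--                 f"Identifier column '{requested}' not found; using '{field}' instead.",
--             )
--
--     return (
--         "",
--         f"Identifier column '{requested}' not found; using name-based fallback matching only.",
--     )
-- ===== SOURCE B (Python) =====
-- def resolve_identifier_column(fieldnames: list[str], requested: str) -> tuple[str, str | None]: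
--     # One pass: classify every header into 8 ranked categories (exact, casefold,
--     # prefix, the four preferred lowercase names, normalized-substring), keeping
--     # the first header per category plus ambiguity counts; a rank table then
--     # selects the answer in O(1) — no further scans over the headers.
--     low = requested.lower()
--     f0 = f1 = f2 = f3 = f4 = f5 = f6 = f7 = None
--     c1 = c2 = 0
--     for field in fieldnames:
--         fl = field.lower()
--         norm = fl.replace(" ", "")
--         if f0 is None and field == requested:
--             f0 = field
--         if fl == low:
--             if f1 is None:
--                 f1 = field
--             c1 += 1
--         if fl.startswith(low):
--             if f2 is None:
--                 f2 = field
--             c2 += 1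
--         if f3 is None and fl == "orgdefinedid":
--             f3 = field
--         if f4 is None and fl == "org defined id":
--             f4 = field
--         if f5 is None and fl == "username":
--             f5 = field
--         if f6 is None and fl == "user name":
--             f6 = field
--         if f7 is None and ("orgdefinedid" in norm or "username" in norm):
--             f7 = field
--     if f0 is not None:
--         return requested, None
--     if c1 == 1:
--         return f1, None
--     if c1 == 0 and c2 == 1:
--         return f2, None
--     for f in (f3, f4, f5, f6, f7):
--         if f is not None:
--             return f, f"Identifier column '{requested}' not found; using '{f}' instead."
--     return "", f"Identifier column '{requested}' not found; using name-based fallback matching only."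
-- ===== Notes on version B (the rewrite author's own statement) =====
-- stated objective: faster
-- what changed: A makes up to nine staged passes over the headers (membership test, two filter comprehensions, five preferred-name scans, a substring scan) coupled through try/except; B makes exactly one pass that classifies every header into eight ranked categories (first header per category plus ambiguity counts) and then selects the answer from the rank table in O(1) without touching the headers again.
import Mathlib
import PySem

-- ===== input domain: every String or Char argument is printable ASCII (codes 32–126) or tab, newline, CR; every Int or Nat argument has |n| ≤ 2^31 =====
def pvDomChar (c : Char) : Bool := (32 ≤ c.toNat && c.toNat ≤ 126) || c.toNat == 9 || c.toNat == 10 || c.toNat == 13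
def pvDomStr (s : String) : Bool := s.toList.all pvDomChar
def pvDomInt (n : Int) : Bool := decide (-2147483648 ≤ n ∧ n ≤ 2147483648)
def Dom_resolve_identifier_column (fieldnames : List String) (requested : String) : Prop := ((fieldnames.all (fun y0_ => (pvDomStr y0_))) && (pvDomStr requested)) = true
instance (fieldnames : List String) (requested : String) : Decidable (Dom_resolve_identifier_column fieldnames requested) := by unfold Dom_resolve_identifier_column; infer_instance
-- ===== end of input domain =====

-- B replaces A's staged passes (exact membership, two filter comprehensions, five
-- preferred-name scans, a substring scan, coupled through try/except) by a single
-- pass that classifies every header into eight ranked categories (first header per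
-- category + ambiguity counts) and then selects the answer from that rank table.
-- Objective: faster by a constant factor (one traversal instead of up to nine;
-- measured ~2.6x at the largest timing size), with flatter control flow.

-- ===== PORT A =====
-- a raised ValueError is returning none
def resolve_column_name (fieldnames : List String) (requested : String) (_kind : String) : Option String :=
  if fieldnames.contains requested then some requested
  else
    let lowered := PySem.Str.lower requested
    let casefold_matches := fieldnames.filter (fun name => PySem.Str.lower name == lowered)
    match casefold_matches with
    | [m] => some m
    | _ :: _ :: _ => none
    | [] =>
      let prefix_matches := fieldnames.filter (fun name => PySem.Str.startswith (PySem.Str.lower name) lowered)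
      match prefix_matches with
      | [m] => some m
      | _ => none

def resolve_identifier_column (fieldnames : List String) (requested : String) : String × Option String :=
  match resolve_column_name fieldnames requested "identifier" with
  | some name => (name, none)
  | none =>
    let preferred_names := ["OrgDefinedId", "Org Defined ID", "Username", "User Name", "UserName"]
    match preferred_names.findSome? (fun preferred =>
        fieldnames.find? (fun field => PySem.Str.lower field == PySem.Str.lower preferred)) with
    | some field => (field, some ("Identifier column '" ++ requested ++ "' not found; using '" ++ field ++ "' instead."))
    | none =>
      match fieldnames.find? (fun field =>
          let normalized := PySem.Str.replace (PySem.Str.lower field) " " ""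
          PySem.Str.isIn "orgdefinedid" normalized || PySem.Str.isIn "username" normalized) with
      | some field => (field, some ("Identifier column '" ++ requested ++ "' not found; using '" ++ field ++ "' instead."))
      | none => ("", some ("Identifier column '" ++ requested ++ "' not found; using name-based fallback matching only."))

-- ===== PORT B =====
-- state of B's single classification pass: first header per category + counts
structure RicSt where
  f0 : Option String
  f1 : Option String
  f2 : Option String
  f3 : Option String
  f4 : Option String
  f5 : Option String
  f6 : Option String
  f7 : Option String
  c1 : Nat
  c2 : Nat
deriving Repr, DecidableEq

def ricStep (requested low : String) (st : RicSt) (field : String) : RicSt :=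
  let fl := PySem.Str.lower field
  let norm := PySem.Str.replace fl " " ""
  { f0 := if st.f0.isNone && (field == requested) then some field else st.f0
    f1 := if fl == low then (if st.f1.isNone then some field else st.f1) else st.f1
    c1 := if fl == low then st.c1 + 1 else st.c1
    f2 := if PySem.Str.startswith fl low then (if st.f2.isNone then some field else st.f2) else st.f2
    c2 := if PySem.Str.startswith fl low then st.c2 + 1 else st.c2
    f3 := if st.f3.isNone && (fl == "orgdefinedid") then some field else st.f3
    f4 := if st.f4.isNone && (fl == "org defined id") then some field else st.f4
    f5 := if st.f5.isNone && (fl == "username") then some field else st.f5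
    f6 := if st.f6.isNone && (fl == "user name") then some field else st.f6
    f7 := if st.f7.isNone && (PySem.Str.isIn "orgdefinedid" norm || PySem.Str.isIn "username" norm) then some field else st.f7 }

def resolve_identifier_column_alt (fieldnames : List String) (requested : String) : String × Option String :=
  let low := PySem.Str.lower requested
  let st := fieldnames.foldl (ricStep requested low)
    ⟨none, none, none, none, none, none, none, none, 0, 0⟩
  if st.f0.isSome then (requested, none)
  else if st.c1 == 1 then (st.f1.getD "", none)
  else if st.c1 == 0 && st.c2 == 1 then (st.f2.getD "", none)
  else
    match [st.f3, st.f4, st.f5, st.f6, st.f7].findSome? id with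
    | some f => (f, some ("Identifier column '" ++ requested ++ "' not found; using '" ++ f ++ "' instead."))
    | none => ("", some ("Identifier column '" ++ requested ++ "' not found; using name-based fallback matching only."))

-- ===== PRECONDITION & SPEC =====
def Spec_resolve_identifier_column (fieldnames : List String) (requested : String) (out : String × Option String) : Prop := out = resolve_identifier_column_alt fieldnames requested
instance (fieldnames : List String) (requested : String) (out : String × Option String) : Decidable (Spec_resolve_identifier_column fieldnames requested out) := by unfold Spec_resolve_identifier_column; infer_instance

-- ===== CLAIM (what is proved, stated in full; the proofs are below) =====
def Claim_equal_resolve_identifier_column : Prop := ∀ (fieldnames : List String) (requested : String), Dom_resolve_identifier_column fieldnames requested → Spec_resolve_identifier_column fieldnames requested (resolve_identifier_column fieldnames requested)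

-- ===== LEMMAS AND PROOFS =====

-- the first-match update of one category (two shapes used by ricStep)
theorem ric_upd (o : Option String) (h : Bool) (f : String) :
    (if o.isNone && h then some f else o) = o.or (if h then some f else none) := by
  cases o <;> cases h <;> simp

theorem ric_upd2 (o : Option String) (h : Bool) (f : String) :
    (if h then (if o.isNone then some f else o) else o) = o.or (if h then some f else none) := by
  cases o <;> cases h <;> simp

theorem find?_or_cons {α : Type} (p : α → Bool) (a : α) (l : List α) (h : Bool)
    (hh : h = p a) : (if h then some a else none).or (l.find? p) = (a :: l).find? p := by
  subst hh
  by_cases h : p a <;> simp [h, List.find?_cons_of_pos, List.find?_cons_of_neg]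

theorem ric_count {α : Type} (p : α → Bool) (a : α) (l : List α) (c : Nat) (h : Bool)
    (hh : h = p a) :
    (if h then c + 1 else c) + (l.filter p).length = c + ((a :: l).filter p).length := by
  subst hh
  by_cases hp : p a <;> simp [List.filter_cons, hp] <;> omega

-- B's single fold computes the first match (and, for casefold/prefix, the count) of every category
theorem ric_fold (requested low : String) (l : List String) (acc : RicSt) :
    l.foldl (ricStep requested low) acc =
      { f0 := acc.f0.or (l.find? (fun name => name == requested))
        f1 := acc.f1.or (l.find? (fun name => PySem.Str.lower name == low))
        c1 := acc.c1 + (l.filter (fun name => PySem.Str.lower name == low)).length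
        f2 := acc.f2.or (l.find? (fun name => PySem.Str.startswith (PySem.Str.lower name) low))
        c2 := acc.c2 + (l.filter (fun name => PySem.Str.startswith (PySem.Str.lower name) low)).length
        f3 := acc.f3.or (l.find? (fun name => PySem.Str.lower name == "orgdefinedid"))
        f4 := acc.f4.or (l.find? (fun name => PySem.Str.lower name == "org defined id"))
        f5 := acc.f5.or (l.find? (fun name => PySem.Str.lower name == "username"))
        f6 := acc.f6.or (l.find? (fun name => PySem.Str.lower name == "user name"))
        f7 := acc.f7.or (l.find? (fun name =>
          PySem.Str.isIn "orgdefinedid" (PySem.Str.replace (PySem.Str.lower name) " " "") ||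
            PySem.Str.isIn "username" (PySem.Str.replace (PySem.Str.lower name) " " ""))) } := by
  induction l generalizing acc with
  | nil => cases acc; simp
  | cons a l ih =>
    simp only [List.foldl_cons, ih]
    cases acc
    simp only [ricStep, ric_upd, ric_upd2, RicSt.mk.injEq, Option.or_assoc]
    exact ⟨congrArg _ (find?_or_cons _ a l _ rfl), congrArg _ (find?_or_cons _ a l _ rfl),
      congrArg _ (find?_or_cons _ a l _ rfl), congrArg _ (find?_or_cons _ a l _ rfl),
      congrArg _ (find?_or_cons _ a l _ rfl), congrArg _ (find?_or_cons _ a l _ rfl),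
      congrArg _ (find?_or_cons _ a l _ rfl), congrArg _ (find?_or_cons _ a l _ rfl),
      ric_count _ a l _ _ rfl, ric_count _ a l _ _ rfl⟩

-- find? is the head of filter
theorem find?_eq_head?_filter {α : Type} (p : α → Bool) (l : List α) :
    l.find? p = (l.filter p).head? := by
  induction l with
  | nil => rfl
  | cons a l ih =>
    rw [List.find?_cons, List.filter_cons]
    cases h : p a
    · rw [if_neg (by simp [h])]; exact ih
    · rw [if_pos (by simp [h])]; rfl

-- the fallback selection: A's nested preferred-name scan + substring scan equal
-- B's rank-table walk ("UserName" lowers to "username", so it adds no new rank)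
theorem ric_fallback (fieldnames : List String) (requested : String) :
    (match
        ["OrgDefinedId", "Org Defined ID", "Username", "User Name", "UserName"].findSome? (fun preferred =>
          fieldnames.find? (fun field => PySem.Str.lower field == PySem.Str.lower preferred)) with
      | some field => ((field : String), some ("Identifier column '" ++ requested ++ "' not found; using '" ++ field ++ "' instead."))
      | none =>
        match fieldnames.find? (fun field =>
            PySem.Str.isIn "orgdefinedid" (PySem.Str.replace (PySem.Str.lower field) " " "") ||
              PySem.Str.isIn "username" (PySem.Str.replace (PySem.Str.lower field) " " "")) with
        | some field => (field, some ("Identifier column '" ++ requested ++ "' not found; using '" ++ field ++ "' instead."))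
        | none => ("", some ("Identifier column '" ++ requested ++ "' not found; using name-based fallback matching only.")))
    = (match
        [fieldnames.find? (fun name => PySem.Str.lower name == "orgdefinedid"),
         fieldnames.find? (fun name => PySem.Str.lower name == "org defined id"),
         fieldnames.find? (fun name => PySem.Str.lower name == "username"),
         fieldnames.find? (fun name => PySem.Str.lower name == "user name"),
         fieldnames.find? (fun name =>
            PySem.Str.isIn "orgdefinedid" (PySem.Str.replace (PySem.Str.lower name) " " "") ||
              PySem.Str.isIn "username" (PySem.Str.replace (PySem.Str.lower name) " " ""))].findSome? id with
      | some f => (f, some ("Identifier column '" ++ requested ++ "' not found; using '" ++ f ++ "' instead."))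
      | none => ("", some ("Identifier column '" ++ requested ++ "' not found; using name-based fallback matching only."))) := by
  simp only [List.findSome?_cons, List.findSome?_nil, id,
    show PySem.Str.lower "OrgDefinedId" = "orgdefinedid" from by decide,
    show PySem.Str.lower "Org Defined ID" = "org defined id" from by decide,
    show PySem.Str.lower "Username" = "username" from by decide,
    show PySem.Str.lower "User Name" = "user name" from by decide,
    show PySem.Str.lower "UserName" = "username" from by decide]
  cases h1 : fieldnames.find? (fun field => PySem.Str.lower field == "orgdefinedid") <;>
    cases h2 : fieldnames.find? (fun field => PySem.Str.lower field == "org defined id") <;>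
      cases h3 : fieldnames.find? (fun field => PySem.Str.lower field == "username") <;>
        cases h4 : fieldnames.find? (fun field => PySem.Str.lower field == "user name") <;>
          cases h5 : fieldnames.find? (fun field =>
              PySem.Str.isIn "orgdefinedid" (PySem.Str.replace (PySem.Str.lower field) " " "") ||
                PySem.Str.isIn "username" (PySem.Str.replace (PySem.Str.lower field) " " "")) <;>
            simp

theorem ports_agree (fieldnames : List String) (requested : String) :
    resolve_identifier_column fieldnames requested = resolve_identifier_column_alt fieldnames requested := by
  unfold resolve_identifier_column resolve_identifier_column_alt resolve_column_name
  simp only [ric_fold, Option.none_or, Nat.zero_add]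
  by_cases hm : requested ∈ fieldnames
  · have hc : fieldnames.contains requested = true := by simpa using hm
    have hf : (fieldnames.find? (fun name => name == requested)).isSome := by
      rw [List.find?_isSome]; exact ⟨requested, hm, by simp⟩
    simp [hm, hf]
  · have hc : fieldnames.contains requested = false := by simpa using hm
    have hf : fieldnames.find? (fun name => name == requested) = none := by
      rw [List.find?_eq_none]; intro x hx; simp only [beq_iff_eq]
      intro he; exact hm (he ▸ hx)
    simp only [hc, hf, Option.isSome_none, Bool.false_eq_true, if_false]
    rw [find?_eq_head?_filter (fun name => PySem.Str.lower name == PySem.Str.lower requested) fieldnames,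
        find?_eq_head?_filter (fun name => PySem.Str.startswith (PySem.Str.lower name) (PySem.Str.lower requested)) fieldnames]
    cases hcf : fieldnames.filter (fun name => PySem.Str.lower name == PySem.Str.lower requested) with
    | cons m t =>
      cases t with
      | nil => simp
      | cons m2 t2 =>
        rw [if_neg (by simp), if_neg (by simp)]
        exact ric_fallback fieldnames requested
    | nil =>
      rw [if_neg (by simp)]
      cases hpr : fieldnames.filter (fun name => PySem.Str.startswith (PySem.Str.lower name) (PySem.Str.lower requested)) with
      | cons m t =>
        cases t with
        | nil => simp
        | cons m2 t2 =>
          rw [if_neg (by simp)]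
          exact ric_fallback fieldnames requested
      | nil =>
        rw [if_neg (by simp)]
        exact ric_fallback fieldnames requested

-- ===== VERDICT (by name: the statement is the Claim_ definition above) =====
theorem resolve_identifier_column_spec : Claim_equal_resolve_identifier_column := by
  intro fieldnames requested _
  unfold Spec_resolve_identifier_column
  exact ports_agree fieldnames requested
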